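-- pv_equiv track=rewrite | github.com/TBillTech/ghostwriter | ghostwriter/pipelines/common.py | filter_narration_brainstorm
-- ===== SOURCE A (Python) =====
-- from typing import Any, Callable, Dict, Iterable, List, Optional, Tuple
--
-- def extract_bullet_contents(text: str) -> List[str]:
--     contents: List[str] = []
--     for ln in text.splitlines():
--         s = ln.lstrip()
--         if not s or s.startswith('#'):
--             continue
--         if s.startswith(('*', '-')):
--             after = s[1:].lstrip()
--             if after:
--                 contents.append(after)
--     return contents
--
-- def rebuild_bullets(contents: List[str]) -> str:
--     return "\n".join([f"* {c}" for c in contents])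
--
-- def filter_narration_brainstorm(text: str, min_chars: int = 24) -> str:
--     orig = extract_bullet_contents(text)
--     if not orig:
--         return text
--     filtered = [c for c in orig if len(c.strip()) >= min_chars]
--     if len(filtered) < 2:
--         sorted_by_len = sorted(orig, key=lambda c: len(c.strip()), reverse=True)
--         filtered = sorted_by_len[: max(2, len(sorted_by_len))]
--         filtered = filtered[:2]
--     return rebuild_bullets(filtered)
-- ===== SOURCE B (Python) =====
-- def _bullet_content(ln):
--     s = ln.lstrip()
--     if s and not s.startswith('#') and s.startswith(('*', '-')):
--         after = s[1:].lstrip()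
--         if after:
--             return after
--     return None
--
-- def filter_narration_brainstorm(text: str, min_chars: int = 24) -> str:
--     orig = [c for c in map(_bullet_content, text.splitlines()) if c is not None]
--     if not orig:
--         return text
--     filtered = [c for c in orig if len(c.strip()) >= min_chars]
--     if len(filtered) < 2:
--         # one pass: keep the two longest bullets (strict '>' so the earliest
--         # bullet wins among equal lengths), longest first
--         best = None
--         second = None
--         for c in orig:
--             L = len(c.strip())
--             if best is None or L > best[1]:
--                 second = best
--                 best = (c, L)
--             elif second is None or L > second[1]:
--                 second = (c, L)
--         filtered = [best[0]] if second is None else [best[0], second[0]]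
--     return "\n".join([f"* {c}" for c in filtered])
-- ===== Notes on version B (the rewrite author's own statement) =====
-- stated objective: alternative
-- what changed: The fallback no longer sorts all bullets: a single left-to-right pass keeps the two longest bullets (strict comparison reproduces the stable reverse sort's earliest-wins tie-break), and bullet extraction is a filter-map over lines instead of an accumulator loop.
import Mathlib
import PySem

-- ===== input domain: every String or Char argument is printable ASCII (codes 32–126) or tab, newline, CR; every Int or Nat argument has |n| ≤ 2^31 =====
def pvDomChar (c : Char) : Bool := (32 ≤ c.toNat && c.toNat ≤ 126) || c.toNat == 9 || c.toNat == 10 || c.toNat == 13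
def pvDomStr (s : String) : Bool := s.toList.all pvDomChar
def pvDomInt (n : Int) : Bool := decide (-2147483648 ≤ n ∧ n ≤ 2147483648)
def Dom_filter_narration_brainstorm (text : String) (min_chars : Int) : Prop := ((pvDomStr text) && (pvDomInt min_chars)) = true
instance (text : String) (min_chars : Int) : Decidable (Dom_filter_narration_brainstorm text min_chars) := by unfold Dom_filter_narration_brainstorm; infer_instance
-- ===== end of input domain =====

-- B replaces the fallback sort-then-take-2 by a one-pass two-longest scan and the
-- extraction loop by a filter-map over lines; same return value, alternative structure.


-- ===== PORT A =====
-- len(c.strip()) as an Int (the sort key / filter measure, shared vocabulary)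
def stripLen (c : String) : Int := PySem.Str.len (PySem.Str.strip c)

def extract_bullet_contents (text : String) : List String :=
  (PySem.Str.splitlines text).foldl (fun contents ln =>
    let s := PySem.Str.lstrip ln
    if s == "" || PySem.Str.startswith s "#" then contents
    else if PySem.Str.startswith s "*" || PySem.Str.startswith s "-" then
      let after := PySem.Str.lstrip (PySem.Str.slice s (some 1) none)
      if after == "" then contents else contents ++ [after]
    else contents) []

def rebuild_bullets (contents : List String) : String :=
  PySem.Str.join "\n" (contents.map (fun c => PySem.Str.join "" ["* ", c]))

def filter_narration_brainstorm (text : String) (min_chars : Int) : String :=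
  let orig := extract_bullet_contents text
  if orig = [] then text
  else
    let filtered := orig.filter (fun c => decide (min_chars ≤ stripLen c))
    let filtered :=
      if PySem.List.len filtered < 2 then
        let sorted_by_len := PySem.List.sorted orig stripLen true
        let f := PySem.List.slice sorted_by_len none (some (max 2 (PySem.List.len sorted_by_len)))
        PySem.List.slice f none (some 2)
      else filtered
    rebuild_bullets filtered

-- ===== PORT B =====
def bulletContent (ln : String) : Option String :=
  let s := PySem.Str.lstrip ln
  if s != "" && !PySem.Str.startswith s "#" &&
     (PySem.Str.startswith s "*" || PySem.Str.startswith s "-") then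
    let after := PySem.Str.lstrip (PySem.Str.slice s (some 1) none)
    if after != "" then some after else none
  else none

-- one step of the two-longest scan: state = (best, second) with their strip-lengths
def top2Step (st : Option (String × Int) × Option (String × Int)) (c : String) :
    Option (String × Int) × Option (String × Int) :=
  let L := stripLen c
  match st with
  | (none, _) => (some (c, L), none)
  | (some (b, bl), sec) =>
    if bl < L then (some (c, L), some (b, bl))
    else
      match sec with
      | none => (some (b, bl), some (c, L))
      | some (s2, sl) => if sl < L then (some (b, bl), some (c, L)) else (some (b, bl), some (s2, sl))

def top2Finish (st : Option (String × Int) × Option (String × Int)) : List String :=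
  match st with
  | (some b, some s) => [b.1, s.1]
  | (some b, none) => [b.1]
  | (none, _) => []

def filter_narration_brainstorm_alt (text : String) (min_chars : Int) : String :=
  let orig := (PySem.Str.splitlines text).filterMap bulletContent
  if orig = [] then text
  else
    let filtered := orig.filter (fun c => decide (min_chars ≤ stripLen c))
    let filtered :=
      if PySem.List.len filtered < 2 then
        top2Finish (orig.foldl top2Step (none, none))
      else filtered
    PySem.Str.join "\n" (filtered.map (fun c => PySem.Str.join "" ["* ", c]))

-- ===== PRECONDITION & SPEC =====
def Spec_filter_narration_brainstorm (text : String) (min_chars : Int) (out : String) : Prop := out = filter_narration_brainstorm_alt text min_chars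
instance (text : String) (min_chars : Int) (out : String) : Decidable (Spec_filter_narration_brainstorm text min_chars out) := by unfold Spec_filter_narration_brainstorm; infer_instance

-- ===== CLAIM (what is proved, stated in full; the proofs are below) =====
def Claim_equal_filter_narration_brainstorm : Prop := ∀ (text : String) (min_chars : Int), Dom_filter_narration_brainstorm text min_chars → Spec_filter_narration_brainstorm text min_chars (filter_narration_brainstorm text min_chars)

-- ===== LEMMAS AND PROOFS =====

-- A's extraction loop is B's filter-map
-- one iteration of A's extraction loop, as an optional append
theorem bullet_step_eq (acc : List String) (ln : String) :
    (let s := PySem.Str.lstrip ln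
     if s == "" || PySem.Str.startswith s "#" then acc
     else if PySem.Str.startswith s "*" || PySem.Str.startswith s "-" then
       let after := PySem.Str.lstrip (PySem.Str.slice s (some 1) none)
       if after == "" then acc else acc ++ [after]
     else acc) = acc ++ (bulletContent ln).toList := by
  simp only [bulletContent]
  split_ifs <;> simp_all

-- A's extraction loop is B's filter-map
theorem extract_eq_filterMap (text : String) :
    extract_bullet_contents text = (PySem.Str.splitlines text).filterMap bulletContent := by
  unfold extract_bullet_contents
  suffices h : ∀ (lines : List String) (acc : List String),
      lines.foldl (fun contents ln =>
        let s := PySem.Str.lstrip ln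
        if s == "" || PySem.Str.startswith s "#" then contents
        else if PySem.Str.startswith s "*" || PySem.Str.startswith s "-" then
          let after := PySem.Str.lstrip (PySem.Str.slice s (some 1) none)
          if after == "" then contents else contents ++ [after]
        else contents) acc = acc ++ lines.filterMap bulletContent by
    simpa using h (PySem.Str.splitlines text) []
  intro lines
  induction lines with
  | nil => intro acc; simp
  | cons ln rest ih =>
    intro acc
    simp only [List.foldl_cons]
    rw [bullet_step_eq, ih]
    cases hb : bulletContent ln <;> simp [hb]

-- encode the first two entries of a list as the scan state
def enc2 : List String → Option (String × Int) × Option (String × Int)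
  | [] => (none, none)
  | [a] => (some (a, stripLen a), none)
  | a :: b :: _ => (some (a, stripLen a), some (b, stripLen b))

theorem top2Step_insertBy (acc : List String) (c : String) :
    top2Step (enc2 acc) c =
      enc2 (PySem.List.insertBy (fun a b => decide (stripLen b < stripLen a)) c acc) := by
  match acc with
  | [] => simp [enc2, top2Step, PySem.List.insertBy]
  | [a] =>
    simp only [enc2, top2Step, PySem.List.insertBy]
    (split_ifs with h1 h2 <;> simp_all)
    omega
  | a :: b :: t =>
    simp only [enc2, top2Step, PySem.List.insertBy]
    split_ifs with h1 h2 h3 <;> simp_all <;> omega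

theorem foldl_top2Step (xs : List String) : ∀ (acc : List String),
    xs.foldl top2Step (enc2 acc) =
      enc2 (xs.foldl (fun acc x =>
        PySem.List.insertBy (fun a b => decide (stripLen b < stripLen a)) x acc) acc) := by
  induction xs with
  | nil => intro acc; rfl
  | cons x rest ih =>
    intro acc
    simp only [List.foldl_cons, top2Step_insertBy]
    exact ih _

theorem top2Finish_enc2 (l : List String) : top2Finish (enc2 l) = l.take 2 := by
  match l with
  | [] => rfl
  | [a] => rfl
  | a :: b :: t => rfl

-- the one-pass scan is take-2 of the stable reverse sort
theorem top2_eq_sorted_take (orig : List String) :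
    top2Finish (orig.foldl top2Step (none, none)) =
      (PySem.List.sorted orig stripLen true).take 2 := by
  have h0 : ((none, none) : Option (String × Int) × Option (String × Int)) = enc2 [] := rfl
  rw [h0, foldl_top2Step, top2Finish_enc2, PySem.List.sorted_rev_eq_foldl_insertBy]

-- A's double slice of the sorted list is take 2
theorem slice_slice_take (l : List String) :
    PySem.List.slice (PySem.List.slice l none (some (max 2 (PySem.List.len l)))) none (some 2) =
      l.take 2 := by
  rw [PySem.List.slice_to l (b := max 2 (PySem.List.len l)) (by simp [PySem.List.len_eq])]
  have h1 : (max 2 (PySem.List.len l)).toNat = max 2 l.length := by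
    simp [PySem.List.len_eq]; omega
  rw [h1, List.take_of_length_le (le_max_right _ _),
      PySem.List.slice_to l (b := 2) (by norm_num)]
  rfl

-- ===== VERDICT (by name: the statement is the Claim_ definition above) =====
theorem filter_narration_brainstorm_spec : Claim_equal_filter_narration_brainstorm := by
  intro text min_chars _
  unfold Spec_filter_narration_brainstorm filter_narration_brainstorm filter_narration_brainstorm_alt rebuild_bullets
  simp only [extract_eq_filterMap, top2_eq_sorted_take, slice_slice_take]
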